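-- pv_equiv track=rewrite | github.com/Modesty2003/habit-awakening | backend/analytics.py | get_level_title
-- ===== SOURCE A (Python) =====
-- def get_level_title(level: int) -> str:
--     milestones = [
--         (30, "传说者"), (20, "王者"), (15, "精英"),
--         (10, "觉醒完成"), (7, "强化者"), (5, "实力者"),
--         (3, "进化者"), (2, "觉醒者"), (1, "普通人"),
--     ]
--     for threshold, title in milestones:
--         if level >= threshold:
--             return title
--     return "普通人"
-- ===== SOURCE B (Python) =====
-- import bisect
--
-- _THRESHOLDS = [1, 2, 3, 5, 7, 10, 15, 20, 30]
-- _TITLES = ["普通人", "觉醒者", "进化者", "实力者", "强化者", "觉醒完成", "精英", "王者", "传说者"]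
--
-- def get_level_title(level: int) -> str:
--     idx = bisect.bisect_right(_THRESHOLDS, level) - 1
--     if idx < 0:
--         return "普通人"
--     return _TITLES[idx]
-- ===== Notes on version B (the rewrite author's own statement) =====
-- stated objective: idiomatic
-- what changed: Replaced the descending linear scan over (threshold,title) pairs with a bisect_right binary search over an ascending threshold list indexing a parallel title list.
import Mathlib
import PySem

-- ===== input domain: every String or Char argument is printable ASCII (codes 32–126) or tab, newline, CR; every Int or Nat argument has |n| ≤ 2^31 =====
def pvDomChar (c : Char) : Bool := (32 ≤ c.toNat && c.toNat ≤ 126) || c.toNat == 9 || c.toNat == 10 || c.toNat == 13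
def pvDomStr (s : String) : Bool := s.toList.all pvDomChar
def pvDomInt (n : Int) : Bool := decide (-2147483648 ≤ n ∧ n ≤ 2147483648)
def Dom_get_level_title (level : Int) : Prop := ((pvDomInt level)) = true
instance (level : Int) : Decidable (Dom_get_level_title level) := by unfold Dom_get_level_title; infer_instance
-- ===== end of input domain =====

-- B replaces A's descending linear scan over (threshold, title) pairs with a bisect_right
-- binary search over an ascending threshold table indexing a parallel title list (idiomatic).

-- ===== PORT A =====
-- the for-loop over milestones with early return, as structural recursion
def pvScanA : List (Int × String) → Int → String
  | [], _ => "普通人"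
  | (threshold, title) :: rest, level =>
      if level ≥ threshold then title else pvScanA rest level

def get_level_title (level : Int) : String :=
  pvScanA [(30, "传说者"), (20, "王者"), (15, "精英"),
           (10, "觉醒完成"), (7, "强化者"), (5, "实力者"),
           (3, "进化者"), (2, "觉醒者"), (1, "普通人")] level

-- ===== PORT B =====
-- bisect.bisect_right(xs, x) on [lo, hi): Python's `while lo < hi` loop, transliterated
-- with a fuel argument (hi - lo shrinks each turn, so fuel = initial hi suffices)
def pvBisectGo (xs : List Int) (x : Int) : Nat → Nat → Nat → Nat
  | 0, lo, _ => lo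
  | fuel + 1, lo, hi =>
    if lo < hi then
      if x < xs.getD ((lo + hi) / 2) 0 then pvBisectGo xs x fuel lo ((lo + hi) / 2)
      else pvBisectGo xs x fuel ((lo + hi) / 2 + 1) hi
    else lo

def pvBisectRight (xs : List Int) (x : Int) : Nat :=
  pvBisectGo xs x xs.length 0 xs.length

def pvThresholds : List Int := [1, 2, 3, 5, 7, 10, 15, 20, 30]
def pvTitles : List String :=
  ["普通人", "觉醒者", "进化者", "实力者", "强化者", "觉醒完成", "精英", "王者", "传说者"]

def get_level_title_alt (level : Int) : String :=
  let idx : Int := (pvBisectRight pvThresholds level : Int) - 1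
  if idx < 0 then "普通人"
  else (PySem.List.pyGet? pvTitles idx).getD "普通人"

-- ===== PRECONDITION & SPEC =====
def Spec_get_level_title (level : Int) (out : String) : Prop := out = get_level_title_alt level
instance (level : Int) (out : String) : Decidable (Spec_get_level_title level out) := by unfold Spec_get_level_title; infer_instance

-- ===== CLAIM (what is proved, stated in full; the proofs are below) =====
def Claim_equal_get_level_title : Prop := ∀ (level : Int), Dom_get_level_title level → Spec_get_level_title level (get_level_title level)

-- ===== LEMMAS AND PROOFS =====
-- one-step unfolding of the bisect loop
theorem go_step (xs : List Int) (x : Int) (fuel lo hi : Nat) :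
    pvBisectGo xs x (fuel + 1) lo hi =
      if lo < hi then
        if x < xs.getD ((lo + hi) / 2) 0 then pvBisectGo xs x fuel lo ((lo + hi) / 2)
        else pvBisectGo xs x fuel ((lo + hi) / 2 + 1) hi
      else lo := rfl

theorem pv_bis_0 (x : Int) (hu : x < 1) :
    pvBisectGo pvThresholds x 9 0 9 = 0 := by
  rw [show (9:Nat) = 8+1 from rfl, go_step]
  norm_num [pvThresholds]
  rw [if_pos (by omega)]
  rw [show (8:Nat) = 7+1 from rfl, go_step]
  norm_num [pvThresholds]
  rw [if_pos (by omega)]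
  rw [show (7:Nat) = 6+1 from rfl, go_step]
  norm_num [pvThresholds]
  rw [if_pos (by omega)]
  rw [show (6:Nat) = 5+1 from rfl, go_step]
  norm_num [pvThresholds]
  rw [if_pos (by omega)]
  rw [show (5:Nat) = 4+1 from rfl, go_step]
  norm_num

theorem pv_bis_1 (x : Int) (hl : 1 ≤ x) (hu : x < 2) :
    pvBisectGo pvThresholds x 9 0 9 = 1 := by
  rw [show (9:Nat) = 8+1 from rfl, go_step]
  norm_num [pvThresholds]
  rw [if_pos (by omega)]
  rw [show (8:Nat) = 7+1 from rfl, go_step]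
  norm_num [pvThresholds]
  rw [if_pos (by omega)]
  rw [show (7:Nat) = 6+1 from rfl, go_step]
  norm_num [pvThresholds]
  rw [if_pos (by omega)]
  rw [show (6:Nat) = 5+1 from rfl, go_step]
  norm_num [pvThresholds]
  rw [if_neg (by omega)]
  rw [show (5:Nat) = 4+1 from rfl, go_step]
  norm_num

theorem pv_bis_2 (x : Int) (hl : 2 ≤ x) (hu : x < 3) :
    pvBisectGo pvThresholds x 9 0 9 = 2 := by
  rw [show (9:Nat) = 8+1 from rfl, go_step]
  norm_num [pvThresholds]
  rw [if_pos (by omega)]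
  rw [show (8:Nat) = 7+1 from rfl, go_step]
  norm_num [pvThresholds]
  rw [if_pos (by omega)]
  rw [show (7:Nat) = 6+1 from rfl, go_step]
  norm_num [pvThresholds]
  rw [if_neg (by omega)]
  rw [show (6:Nat) = 5+1 from rfl, go_step]
  norm_num

theorem pv_bis_3 (x : Int) (hl : 3 ≤ x) (hu : x < 5) :
    pvBisectGo pvThresholds x 9 0 9 = 3 := by
  rw [show (9:Nat) = 8+1 from rfl, go_step]
  norm_num [pvThresholds]
  rw [if_pos (by omega)]
  rw [show (8:Nat) = 7+1 from rfl, go_step]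
  norm_num [pvThresholds]
  rw [if_neg (by omega)]
  rw [show (7:Nat) = 6+1 from rfl, go_step]
  norm_num [pvThresholds]
  rw [if_pos (by omega)]
  rw [show (6:Nat) = 5+1 from rfl, go_step]
  norm_num

theorem pv_bis_4 (x : Int) (hl : 5 ≤ x) (hu : x < 7) :
    pvBisectGo pvThresholds x 9 0 9 = 4 := by
  rw [show (9:Nat) = 8+1 from rfl, go_step]
  norm_num [pvThresholds]
  rw [if_pos (by omega)]
  rw [show (8:Nat) = 7+1 from rfl, go_step]
  norm_num [pvThresholds]
  rw [if_neg (by omega)]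
  rw [show (7:Nat) = 6+1 from rfl, go_step]
  norm_num [pvThresholds]
  rw [if_neg (by omega)]
  rw [show (6:Nat) = 5+1 from rfl, go_step]
  norm_num

theorem pv_bis_5 (x : Int) (hl : 7 ≤ x) (hu : x < 10) :
    pvBisectGo pvThresholds x 9 0 9 = 5 := by
  rw [show (9:Nat) = 8+1 from rfl, go_step]
  norm_num [pvThresholds]
  rw [if_neg (by omega)]
  rw [show (8:Nat) = 7+1 from rfl, go_step]
  norm_num [pvThresholds]
  rw [if_pos (by omega)]
  rw [show (7:Nat) = 6+1 from rfl, go_step]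
  norm_num [pvThresholds]
  rw [if_pos (by omega)]
  rw [show (6:Nat) = 5+1 from rfl, go_step]
  norm_num [pvThresholds]
  rw [if_pos (by omega)]
  rw [show (5:Nat) = 4+1 from rfl, go_step]
  norm_num

theorem pv_bis_6 (x : Int) (hl : 10 ≤ x) (hu : x < 15) :
    pvBisectGo pvThresholds x 9 0 9 = 6 := by
  rw [show (9:Nat) = 8+1 from rfl, go_step]
  norm_num [pvThresholds]
  rw [if_neg (by omega)]
  rw [show (8:Nat) = 7+1 from rfl, go_step]
  norm_num [pvThresholds]
  rw [if_pos (by omega)]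
  rw [show (7:Nat) = 6+1 from rfl, go_step]
  norm_num [pvThresholds]
  rw [if_pos (by omega)]
  rw [show (6:Nat) = 5+1 from rfl, go_step]
  norm_num [pvThresholds]
  rw [if_neg (by omega)]
  rw [show (5:Nat) = 4+1 from rfl, go_step]
  norm_num

theorem pv_bis_7 (x : Int) (hl : 15 ≤ x) (hu : x < 20) :
    pvBisectGo pvThresholds x 9 0 9 = 7 := by
  rw [show (9:Nat) = 8+1 from rfl, go_step]
  norm_num [pvThresholds]
  rw [if_neg (by omega)]
  rw [show (8:Nat) = 7+1 from rfl, go_step]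
  norm_num [pvThresholds]
  rw [if_pos (by omega)]
  rw [show (7:Nat) = 6+1 from rfl, go_step]
  norm_num [pvThresholds]
  rw [if_neg (by omega)]
  rw [show (6:Nat) = 5+1 from rfl, go_step]
  norm_num

theorem pv_bis_8 (x : Int) (hl : 20 ≤ x) (hu : x < 30) :
    pvBisectGo pvThresholds x 9 0 9 = 8 := by
  rw [show (9:Nat) = 8+1 from rfl, go_step]
  norm_num [pvThresholds]
  rw [if_neg (by omega)]
  rw [show (8:Nat) = 7+1 from rfl, go_step]
  norm_num [pvThresholds]
  rw [if_neg (by omega)]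
  rw [show (7:Nat) = 6+1 from rfl, go_step]
  norm_num [pvThresholds]
  rw [if_pos (by omega)]
  rw [show (6:Nat) = 5+1 from rfl, go_step]
  norm_num

theorem pv_bis_9 (x : Int) (hl : 30 ≤ x) :
    pvBisectGo pvThresholds x 9 0 9 = 9 := by
  rw [show (9:Nat) = 8+1 from rfl, go_step]
  norm_num [pvThresholds]
  rw [if_neg (by omega)]
  rw [show (8:Nat) = 7+1 from rfl, go_step]
  norm_num [pvThresholds]
  rw [if_neg (by omega)]
  rw [show (7:Nat) = 6+1 from rfl, go_step]
  norm_num [pvThresholds]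
  rw [if_neg (by omega)]
  rw [show (6:Nat) = 5+1 from rfl, go_step]
  norm_num

set_option maxHeartbeats 1600000 in
theorem pv_eval (level : Int) : get_level_title level = get_level_title_alt level := by
  unfold get_level_title get_level_title_alt pvBisectRight
  by_cases h0 : level < 1
  · norm_num [show pvThresholds.length = 9 from rfl, pvTitles, pvScanA, pv_bis_0 level (by omega),
              PySem.List.pyGet?, PySem.List.pyIdx?] <;>
      split_ifs <;> first | rfl | omega
  by_cases h1 : level < 2
  · norm_num [show pvThresholds.length = 9 from rfl, pvTitles, pvScanA, pv_bis_1 level (by omega) (by omega),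
              PySem.List.pyGet?, PySem.List.pyIdx?] <;>
      split_ifs <;> first | rfl | omega
  by_cases h2 : level < 3
  · norm_num [show pvThresholds.length = 9 from rfl, pvTitles, pvScanA, pv_bis_2 level (by omega) (by omega),
              PySem.List.pyGet?, PySem.List.pyIdx?] <;>
      split_ifs <;> first | rfl | omega
  by_cases h3 : level < 5
  · norm_num [show pvThresholds.length = 9 from rfl, pvTitles, pvScanA, pv_bis_3 level (by omega) (by omega),
              PySem.List.pyGet?, PySem.List.pyIdx?] <;>
      split_ifs <;> first | rfl | omega
  by_cases h4 : level < 7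
  · norm_num [show pvThresholds.length = 9 from rfl, pvTitles, pvScanA, pv_bis_4 level (by omega) (by omega),
              PySem.List.pyGet?, PySem.List.pyIdx?] <;>
      split_ifs <;> first | rfl | omega
  by_cases h5 : level < 10
  · norm_num [show pvThresholds.length = 9 from rfl, pvTitles, pvScanA, pv_bis_5 level (by omega) (by omega),
              PySem.List.pyGet?, PySem.List.pyIdx?] <;>
      split_ifs <;> first | rfl | omega
  by_cases h6 : level < 15
  · norm_num [show pvThresholds.length = 9 from rfl, pvTitles, pvScanA, pv_bis_6 level (by omega) (by omega),
              PySem.List.pyGet?, PySem.List.pyIdx?] <;>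
      split_ifs <;> first | rfl | omega
  by_cases h7 : level < 20
  · norm_num [show pvThresholds.length = 9 from rfl, pvTitles, pvScanA, pv_bis_7 level (by omega) (by omega),
              PySem.List.pyGet?, PySem.List.pyIdx?] <;>
      split_ifs <;> first | rfl | omega
  by_cases h8 : level < 30
  · norm_num [show pvThresholds.length = 9 from rfl, pvTitles, pvScanA, pv_bis_8 level (by omega) (by omega),
              PySem.List.pyGet?, PySem.List.pyIdx?] <;>
      split_ifs <;> first | rfl | omega
  · norm_num [show pvThresholds.length = 9 from rfl, pvTitles, pvScanA, pv_bis_9 level (by omega),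
              PySem.List.pyGet?, PySem.List.pyIdx?] <;>
      split_ifs <;> first | rfl | omega

-- ===== VERDICT (by name: the statement is the Claim_ definition above) =====
theorem get_level_title_spec : Claim_equal_get_level_title := by
  intro level _
  unfold Spec_get_level_title
  exact pv_eval level
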